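-- pv_equiv track=rewrite | github.com/pawnsac/BLADE-deb | src/trimmer.py | restore_lines
-- ===== SOURCE A (Python) =====
-- def restore_lines(output, original_doc, addr):
--     output = output.copy()
--     if addr[0] == addr[2]:
--         line = output[addr[0] - 1]
--         line = list(line)
--         line[addr[1] - 1 : addr[3]] = original_doc[addr[0] - 1][addr[1] - 1 : addr[3]]
--         line = "".join(line)
--         output[addr[0] - 1] = line
--     else:
--         start = True
--         for i in range(addr[0] - 1, addr[2]):
--             line = output[i]
--             line = list(line)
--             if start:
--                 line[addr[1] - 1 :] = original_doc[i][addr[1] - 1 :]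
--                 start = False
--             elif i == addr[2] - 1:
--                 line[: addr[3]] = original_doc[i][: addr[3]]
--             else:
--                 line = original_doc[i]
--             line = "".join(line)
--             output[i] = line
--     return output
-- ===== SOURCE B (Python) =====
-- def restore_lines(output, original_doc, addr):
--     l1, c1, l2, c2 = addr
--     if l1 == l2:
--         line = output[l1 - 1]
--         mid = [line[:c1 - 1] + original_doc[l1 - 1][c1 - 1:c2] + line[c2:]]
--     elif l1 < l2:
--         first = output[l1 - 1]
--         last = output[l2 - 1]
--         mid = ([first[:c1 - 1] + original_doc[l1 - 1][c1 - 1:]]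
--                + original_doc[l1:l2 - 1]
--                + [original_doc[l2 - 1][:c2] + last[c2:]])
--     else:
--         return output.copy()
--     return output[:l1 - 1] + mid + output[l2:]
-- ===== Notes on version B (the rewrite author's own statement) =====
-- stated objective: simpler
-- what changed: B has no loop and no mutation: it rebuilds the document as a list concatenation output[:l1-1] + mid + output[l2:], where mid is one spliced line (same-line case) or [first splice] + original_doc[l1:l2-1] + [last splice], replacing A's flag-driven per-line loop over char lists with slice arithmetic on the line list itself.
-- outside the precondition, e.g. on restore_lines(['ab'], ['xy'], (1, 0, 1, 0)): A returns ['ab'], B returns ['aab']; on restore_lines(['ab'], ['xy'], (0, 1, 0, 1)): A returns ['xb'], B returns ['xb', 'ab']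
import Mathlib
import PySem

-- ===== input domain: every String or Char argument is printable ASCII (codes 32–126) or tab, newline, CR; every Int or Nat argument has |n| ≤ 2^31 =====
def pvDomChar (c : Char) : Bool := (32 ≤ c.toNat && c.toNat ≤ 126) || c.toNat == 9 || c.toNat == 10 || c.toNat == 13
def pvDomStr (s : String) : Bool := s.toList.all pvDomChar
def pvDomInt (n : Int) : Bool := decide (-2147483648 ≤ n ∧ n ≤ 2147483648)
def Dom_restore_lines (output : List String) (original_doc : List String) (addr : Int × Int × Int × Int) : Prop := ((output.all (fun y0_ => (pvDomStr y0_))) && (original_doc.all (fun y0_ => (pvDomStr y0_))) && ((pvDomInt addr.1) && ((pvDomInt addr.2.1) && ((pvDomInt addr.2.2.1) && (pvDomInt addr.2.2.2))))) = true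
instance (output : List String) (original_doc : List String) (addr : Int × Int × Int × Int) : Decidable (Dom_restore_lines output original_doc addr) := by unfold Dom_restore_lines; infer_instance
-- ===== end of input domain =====

-- B rebuilds the document with no loop and no mutation, as the list concatenation
-- output[:l1-1] ++ mid ++ output[l2:] (mid = one spliced line, or first splice / wholesale
-- original_doc[l1:l2-1] slice / last splice), instead of A's flag-driven per-line loop over
-- char lists mutating a copy; objective: simpler.

-- ===== PORT A =====
-- loop body of A's for-loop (state = (output, start)); the slice assignments 'line[a:] = r' / 'line[:b] = r'
-- are ported as the splices line[:a] ++ r and r ++ line[b:], which are exact for every a, b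
def restoreStepA (original_doc : List String) (c1 l2 c2 : Int) (st : List String × Bool) (i : Int) : List String × Bool :=
  let cs := (PySem.List.pyGetD st.1 i "").toList
  let ocs := (PySem.List.pyGetD original_doc i "").toList
  if st.2 then
    (PySem.List.pySetD st.1 i (String.ofList
      (PySem.List.slice cs none (some (c1 - 1)) ++ PySem.List.slice ocs (some (c1 - 1)) none)), false)
  else if i = l2 - 1 then
    (PySem.List.pySetD st.1 i (String.ofList
      (PySem.List.slice ocs none (some c2) ++ PySem.List.slice cs (some c2) none)), st.2)
  else
    (PySem.List.pySetD st.1 i (String.ofList ocs), st.2)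

def restore_lines (output : List String) (original_doc : List String) (addr : Int × Int × Int × Int) : List String :=
  let l1 := addr.1
  let c1 := addr.2.1
  let l2 := addr.2.2.1
  let c2 := addr.2.2.2
  if l1 = l2 then
    let cs := (PySem.List.pyGetD output (l1 - 1) "").toList
    let ocs := (PySem.List.pyGetD original_doc (l1 - 1) "").toList
    -- line[c1-1:c2] = original_doc[l1-1][c1-1:c2], then '"".join'; Python-exact slice assignment:
    -- keep line[:clamp(c1-1)], insert the replacement, keep the tail from max(clamp(c1-1), clamp(c2))
    PySem.List.pySetD output (l1 - 1) (String.ofList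
      (PySem.List.slice cs none (some (c1 - 1)) ++ PySem.List.slice ocs (some (c1 - 1)) (some c2) ++
       cs.drop (max (PySem.List.clampIdx cs.length (c1 - 1)) (PySem.List.clampIdx cs.length c2))))
  else
    ((PySem.List.pyRange (l1 - 1) l2 1).foldl (restoreStepA original_doc c1 l2 c2) (output, true)).1

-- ===== PORT B =====
def restore_lines_alt (output : List String) (original_doc : List String) (addr : Int × Int × Int × Int) : List String :=
  match addr with
  | (l1, c1, l2, c2) =>
    if l1 = l2 then
      let line := (PySem.List.pyGetD output (l1 - 1) "").toList
      let og := (PySem.List.pyGetD original_doc (l1 - 1) "").toList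
      let mid := [String.ofList
        (PySem.List.slice line none (some (c1 - 1)) ++ PySem.List.slice og (some (c1 - 1)) (some c2) ++
         PySem.List.slice line (some c2) none)]
      PySem.List.slice output none (some (l1 - 1)) ++ mid ++ PySem.List.slice output (some l2) none
    else if l1 < l2 then
      let first := (PySem.List.pyGetD output (l1 - 1) "").toList
      let last := (PySem.List.pyGetD output (l2 - 1) "").toList
      let mid :=
        [String.ofList (PySem.List.slice first none (some (c1 - 1)) ++
           PySem.List.slice (PySem.List.pyGetD original_doc (l1 - 1) "").toList (some (c1 - 1)) none)]
        ++ PySem.List.slice original_doc (some l1) (some (l2 - 1))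
        ++ [String.ofList (PySem.List.slice (PySem.List.pyGetD original_doc (l2 - 1) "").toList none (some c2) ++
             PySem.List.slice last (some c2) none)]
      PySem.List.slice output none (some (l1 - 1)) ++ mid ++ PySem.List.slice output (some l2) none
    else
      -- the span l1..l2 is empty: return the untouched copy
      output

-- ===== PRECONDITION & SPEC =====
-- Pre_ excludes (a) inputs on which A raises IndexError (a touched line number outside both lists'
-- Python index range), (b) non-positive line numbers — outside the natural 1-based addressing domain,
-- where A's negative-index wraparound is accidental — and (c) single-line addresses whose clamped
-- column span is reversed, where A's empty slice-assignment leaves the line unchanged while a splice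
-- duplicates characters: a corner where either value is defensible.
def Pre_restore_lines (output : List String) (original_doc : List String) (addr : Int × Int × Int × Int) : Prop :=
  (addr.1 = addr.2.2.1 ∧ 1 ≤ addr.1 ∧
     addr.1 ≤ (output.length : Int) ∧ addr.1 ≤ (original_doc.length : Int) ∧
     PySem.List.clampIdx (PySem.List.pyGetD output (addr.1 - 1) "").toList.length (addr.2.1 - 1)
       ≤ PySem.List.clampIdx (PySem.List.pyGetD output (addr.1 - 1) "").toList.length addr.2.2.2)
  ∨ (addr.1 < addr.2.2.1 ∧ 1 ≤ addr.1 ∧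
     addr.2.2.1 ≤ (output.length : Int) ∧ addr.2.2.1 ≤ (original_doc.length : Int))
  ∨ addr.2.2.1 < addr.1
instance (output : List String) (original_doc : List String) (addr : Int × Int × Int × Int) : Decidable (Pre_restore_lines output original_doc addr) := by unfold Pre_restore_lines; infer_instance

def pvWitness_restore_lines : List String × List String × (Int × Int × Int × Int) :=
  (["abc", "de", "f"], ["xyz", "vw", "u"], (1, 2, 3, 1))

def Spec_restore_lines (output : List String) (original_doc : List String) (addr : Int × Int × Int × Int) (out : List String) : Prop := out = restore_lines_alt output original_doc addr
instance (output : List String) (original_doc : List String) (addr : Int × Int × Int × Int) (out : List String) : Decidable (Spec_restore_lines output original_doc addr out) := by unfold Spec_restore_lines; infer_instance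

-- ===== CLAIM (what is proved, stated in full; the proofs are below) =====
def Claim_equal_restore_lines : Prop := ∀ (output : List String) (original_doc : List String) (addr : Int × Int × Int × Int), Dom_restore_lines output original_doc addr → Pre_restore_lines output original_doc addr → Spec_restore_lines output original_doc addr (restore_lines output original_doc addr)

-- ===== LEMMAS AND PROOFS =====

-- with start = false and every index strictly before l2 - 1, A's loop writes original lines wholesale
lemma foldl_restoreStepA_mid (original_doc : List String) (c1 l2 c2 : Int) (xs : List Int) (out : List String)
    (h : ∀ i ∈ xs, i ≠ l2 - 1) :
    xs.foldl (restoreStepA original_doc c1 l2 c2) (out, false)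
      = (xs.foldl (fun out i => PySem.List.pySetD out i (PySem.List.pyGetD original_doc i "")) out, false) := by
  induction xs generalizing out with
  | nil => rfl
  | cons x xs ih =>
    have hx : x ≠ l2 - 1 := h x (by simp)
    simp only [List.foldl_cons]
    rw [show restoreStepA original_doc c1 l2 c2 (out, false) x
          = (PySem.List.pySetD out x (PySem.List.pyGetD original_doc x ""), false) by
        simp [restoreStepA, hx, String.ofList_toList]]
    exact ih _ (fun i hi => h i (by simp [hi]))

-- the wholesale-copy fold over indices a..a+k replaces that segment of out by original lines
lemma fold_copy_seg (og : List String) (a k : Nat) (out : List String)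
    (hout : a + k ≤ out.length) (hog : a + k ≤ og.length) :
    (PySem.List.pyRange (a : Int) ((a : Int) + (k : Int)) 1).foldl
        (fun out i => PySem.List.pySetD out i (PySem.List.pyGetD og i "")) out
      = out.take a ++ (og.drop a).take k ++ out.drop (a + k) := by
  induction k with
  | zero =>
    rw [show ((a:Int) + ((0:Nat):Int) : Int) = (a:Int) by push_cast; ring,
        PySem.List.pyRange_one_eq_nil le_rfl]
    simp
  | succ k ih =>
    have hak : a + k < out.length := by omega
    have hogk : a + k < og.length := by omega
    rw [show ((a:Int) + ((k+1:Nat):Int) : Int) = ((a:Int) + (k:Nat)) + 1 by push_cast; ring,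
        PySem.List.pyRange_one_succ_right (by omega)]
    rw [List.foldl_append, ih (by omega) (by omega)]
    simp only [List.foldl_cons, List.foldl_nil]
    rw [show ((a:Int) + (k:Nat) : Int) = (((a+k : Nat)):Int) by push_cast; ring]
    rw [show PySem.List.pyGetD og ((a+k : Nat) : Int) "" = og[a+k] by
      rw [PySem.List.pyGetD_natCast, List.getD_eq_getElem?_getD, List.getElem?_eq_getElem hogk]; rfl]
    rw [PySem.List.pySetD_natCast]
    have hlen1 : (out.take a).length = a := by simp; omega
    have hlen2 : ((og.drop a).take k).length = k := by simp; omega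
    rw [List.append_assoc, List.set_append_right _ _ (by omega),
        List.set_append_right _ _ (by simp [hlen1, hlen2])]
    rw [show a + k - (out.take a).length - ((og.drop a).take k).length = 0 by
      simp [hlen1, hlen2]]
    rw [List.drop_eq_getElem_cons hak, List.set_cons_zero]
    rw [show (og.drop a).take (k+1) = (og.drop a).take k ++ [og[a+k]] by
      rw [List.take_succ_eq_append_getElem (by simp; omega)]
      congr 1
      simp [List.getElem_drop]]
    simp [List.append_assoc, show a + (k+1) = a + k + 1 by omega]

-- ===== VERDICT (by name: the statement is the Claim_ definition above) =====
theorem restore_lines_spec : Claim_equal_restore_lines := by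
  intro output original_doc addr _ hpre
  obtain ⟨l1, c1, l2, c2⟩ := addr
  unfold Pre_restore_lines at hpre
  dsimp only at hpre
  unfold Spec_restore_lines restore_lines restore_lines_alt
  dsimp only
  rcases hpre with ⟨heq, hl1, hlo, hld, hclamp⟩ | ⟨hlt, hl1, hlo, hld⟩ | hgt
  · -- same line
    subst heq
    obtain ⟨n, rfl⟩ : ∃ n : Nat, l1 = (n:Int) + 1 := ⟨(l1 - 1).toNat, by omega⟩
    have hn : n < output.length := by omega
    rw [max_eq_right hclamp, ← PySem.List.slice_some_none]
    rw [show ((n:Int) + 1 - 1) = ((n:Nat):Int) by ring]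
    rw [PySem.List.pySetD_natCast, PySem.List.slice_to_natCast,
        show ((n:Int) + 1) = (((n+1:Nat)):Int) by push_cast; ring,
        PySem.List.slice_from_natCast]
    rw [List.set_eq_take_cons_drop _ hn]
    simp
  · -- l1 < l2: first splice, wholesale middle copies, last splice
    obtain ⟨n, rfl⟩ : ∃ n : Nat, l1 = (n:Int) + 1 := ⟨(l1 - 1).toNat, by omega⟩
    obtain ⟨m, rfl⟩ : ∃ m : Nat, l2 = (m:Int) + 1 := ⟨(l2 - 1).toNat, by omega⟩
    have hnm : n + 1 ≤ m := by omega
    have hmo : m < output.length := by omega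
    have hmd : m < original_doc.length := by omega
    have hll : ¬ ((n:Int) + 1 = (m:Int) + 1) := by omega
    simp only [if_neg hll, if_pos (show (n:Int) + 1 < (m:Int) + 1 by omega)]
    rw [show ((n:Int) + 1 - 1) = ((n:Nat):Int) by ring,
        show ((m:Int) + 1 - 1) = ((m:Nat):Int) by ring]
    -- peel off the first iteration
    rw [PySem.List.pyRange_one_cons (by omega)]
    simp only [List.foldl_cons]
    rw [show restoreStepA original_doc c1 ((m:Int)+1) c2 (output, true) (n:Int)
          = (PySem.List.pySetD output (n:Int) (String.ofList
              (PySem.List.slice (PySem.List.pyGetD output (n:Int) "").toList none (some (c1 - 1)) ++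
               PySem.List.slice (PySem.List.pyGetD original_doc (n:Int) "").toList (some (c1 - 1)) none)), false) by
        simp [restoreStepA]]
    -- split off the last iteration
    rw [show PySem.List.pyRange ((n:Int) + 1) ((m:Int) + 1) 1
          = PySem.List.pyRange ((n:Int)+1) (m:Int) 1 ++ [(m:Int)] by
        rw [PySem.List.pyRange_one_append ((n:Int)+1) (m:Int) ((m:Int)+1) (by omega) (by omega)]
        congr 1
        exact PySem.List.pyRange_one_singleton (m:Int)]
    rw [List.foldl_append]
    -- the middle is a wholesale copy of original lines
    rw [foldl_restoreStepA_mid _ _ _ _ _ _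
        (fun i hi => by
          have := (PySem.List.mem_pyRange_one).1 hi
          omega)]
    rw [show PySem.List.pyRange ((n:Int)+1) (m:Int) 1
          = PySem.List.pyRange ((n+1 : Nat) : Int) (((n+1 : Nat) : Int) + ((m - (n+1) : Nat) : Int)) 1 by
        congr 1 <;> push_cast <;> omega]
    rw [PySem.List.pySetD_natCast]
    set f := String.ofList
        (PySem.List.slice (PySem.List.pyGetD output (n:Int) "").toList none (some (c1 - 1)) ++
         PySem.List.slice (PySem.List.pyGetD original_doc (n:Int) "").toList (some (c1 - 1)) none) with hf
    rw [fold_copy_seg original_doc (n+1) (m - (n+1)) (output.set n f)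
        (by simp; omega) (by omega)]
    have hseg : n + 1 + (m - (n+1)) = m := by omega
    rw [hseg]
    -- normalize the prefix built so far
    have htake : (output.set n f).take (n+1) = output.take n ++ [f] := by
      rw [List.take_set, List.take_succ_eq_append_getElem (by omega),
          List.set_append_right _ _ (by simp)]
      congr 1
      rw [show n - (output.take n).length = 0 by simp; omega]
      rfl
    have hdrop : (output.set n f).drop m = output.drop m := by
      rw [List.drop_set]
      simp [show n < m by omega]
    rw [htake, hdrop]
    -- the final iteration: the last-line splice
    simp only [List.foldl_cons, List.foldl_nil]
    set P := output.take n ++ [f] ++ (original_doc.drop (n+1)).take (m - (n+1)) with hP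
    have hPlen : P.length = m := by
      simp [hP]
      omega
    have hgetP : PySem.List.pyGetD (P ++ output.drop m) (m:Int) ""
        = PySem.List.pyGetD output (m:Int) "" := by
      rw [PySem.List.pyGetD_natCast, PySem.List.pyGetD_natCast,
          List.getD_eq_getElem?_getD, List.getD_eq_getElem?_getD,
          List.getElem?_append_right (by omega), hPlen]
      rw [List.getElem?_drop]
      simp
    rw [show restoreStepA original_doc c1 ((m:Int)+1) c2
            (P ++ output.drop m, false) (m:Int)
          = (PySem.List.pySetD (P ++ output.drop m) (m:Int) (String.ofList
              (PySem.List.slice (PySem.List.pyGetD original_doc (m:Int) "").toList none (some c2) ++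
               PySem.List.slice (PySem.List.pyGetD (P ++ output.drop m) (m:Int) "").toList (some c2) none)), false) by
        unfold restoreStepA
        rw [if_neg (by simp), if_pos (by ring : (m:Int) = (m:Int) + 1 - 1)]]
    rw [hgetP, PySem.List.pySetD_natCast,
        List.set_append_right _ _ (by omega), hPlen]
    rw [List.drop_eq_getElem_cons hmo]
    simp only [Nat.sub_self, List.set_cons_zero]
    -- assemble: both sides are take n ++ [f] ++ middle ++ [last] ++ drop (m+1)
    rw [PySem.List.slice_to_natCast,
        show ((m:Int) + 1) = (((m+1:Nat)):Int) by push_cast; ring,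
        PySem.List.slice_from_natCast,
        show PySem.List.slice original_doc (some ((n:Int) + 1)) (some (m:Int))
            = (original_doc.drop ((n:Int) + 1).toNat).take ((m:Int).toNat - ((n:Int) + 1).toNat) by
          rw [PySem.List.slice_toNat] <;> omega]
    simp [hP, List.append_assoc]
  · -- l2 < l1: A's loop range is empty, B returns the untouched copy
    simp only [if_neg (by omega : ¬ l1 = l2), if_neg (by omega : ¬ l1 < l2)]
    rw [PySem.List.pyRange_one_eq_nil (by omega : l2 ≤ l1 - 1)]
    simp only [List.foldl_nil]
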